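-- pv_equiv track=rewrite | github.com/gi-bielefeld/scj-carp | utils.py | get_core
-- ===== SOURCE A (Python) =====
-- def get_core(gnms):
--     core = None
--     for nm, chrs in gnms:
--         marker_set = set()
--         for tp, markers in chrs:
--             for orient,marker in markers:
--                 marker_set.add(marker)
--         if core is None:
--             core=marker_set
--         else:
--             core.intersection_update(marker_set)
--     return core
-- ===== SOURCE B (Python) =====
-- def get_core(gnms):
--     gnms = list(gnms)
--     n = len(gnms)
--     if n == 0:
--         return None
--     counter = {}
--     for nm, chrs in gnms:
--         seen = {marker for tp, markers in chrs for orient, marker in markers}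
--         for m in seen:
--             counter[m] = counter.get(m, 0) + 1
--     return {m for m, c in counter.items() if c == n}
-- ===== Notes on version B (the rewrite author's own statement) =====
-- stated objective: alternative
-- what changed: Replaces pairwise set intersection_update across genomes by a single occurrence counter over per-genome deduplicated marker sets, thresholded at the number of genomes.
import Mathlib
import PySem

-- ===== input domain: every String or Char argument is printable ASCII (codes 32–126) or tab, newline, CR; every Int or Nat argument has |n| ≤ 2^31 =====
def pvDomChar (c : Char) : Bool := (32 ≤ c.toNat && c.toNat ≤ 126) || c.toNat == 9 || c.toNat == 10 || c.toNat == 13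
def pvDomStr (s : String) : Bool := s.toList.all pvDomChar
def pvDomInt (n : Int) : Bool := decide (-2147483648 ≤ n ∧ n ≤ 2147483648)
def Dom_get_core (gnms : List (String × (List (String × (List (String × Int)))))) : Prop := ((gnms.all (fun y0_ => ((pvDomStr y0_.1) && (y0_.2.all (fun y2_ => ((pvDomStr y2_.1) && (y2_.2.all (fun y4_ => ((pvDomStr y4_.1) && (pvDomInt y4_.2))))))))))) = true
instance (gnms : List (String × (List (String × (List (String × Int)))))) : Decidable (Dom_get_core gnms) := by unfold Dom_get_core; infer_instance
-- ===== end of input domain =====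

-- B replaces pairwise intersection_update with a cross-genome occurrence counter thresholded at the genome count (alternative decomposition, same cost).

-- ===== PORT A =====
def get_core (gnms : List (String × (List (String × (List (String × Int)))))) : Option (List Int) :=
  gnms.foldl
    (fun core g =>
      let marker_set : PySem.Set Int :=
        g.2.foldl (fun ms c => c.2.foldl (fun ms om => PySem.Set.add ms om.2) ms) PySem.Set.empty
      match core with
      | none => some marker_set
      | some c => some (PySem.Set.inter c marker_set))
    none

-- ===== PORT B =====
-- the per-genome set comprehension {marker for tp, markers in chrs for orient, marker in markers}
def pvSeen (chrs : List (String × (List (String × Int)))) : PySem.Set Int :=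
  PySem.Set.ofList (chrs.flatMap (fun c => c.2.map (fun om => om.2)))

def get_core_alt (gnms : List (String × (List (String × (List (String × Int)))))) : Option (List Int) :=
  if gnms.length = 0 then none
  else
    let counter : PySem.Dict Int Int :=
      gnms.foldl
        (fun d g => (pvSeen g.2).foldl (fun d m => d.insert m (d.getD m 0 + 1)) d)
        PySem.Dict.empty
    some (PySem.Set.ofList
      ((counter.items.filter (fun p => p.2 == (gnms.length : Int))).map (fun p => p.1)))

-- ===== PRECONDITION & SPEC =====
def Spec_get_core (gnms : List (String × (List (String × (List (String × Int)))))) (out : Option (List Int)) : Prop := out = get_core_alt gnms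
instance (gnms : List (String × (List (String × (List (String × Int)))))) (out : Option (List Int)) : Decidable (Spec_get_core gnms out) := by unfold Spec_get_core; infer_instance

-- ===== CLAIM (what is proved, stated in full; the proofs are below) =====
def Claim_equal_get_core : Prop := ∀ (gnms : List (String × (List (String × (List (String × Int)))))), Dom_get_core gnms → Spec_get_core gnms (get_core gnms)

-- ===== LEMMAS AND PROOFS =====

-- A's hand-built per-genome marker set is set() of the flattened marker list
theorem a_mset_eq (chrs : List (String × (List (String × Int)))) :
    chrs.foldl (fun ms c => c.2.foldl (fun ms om => PySem.Set.add ms om.2) ms) PySem.Set.empty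
      = pvSeen chrs := by
  unfold pvSeen PySem.Set.ofList
  rw [List.flatMap_def, List.foldl_flatten, List.foldl_map]
  refine PySem.List.foldl_congr_mem _ _ _ _ ?_
  intro acc c _
  rw [List.foldl_map]

-- A's fold once core is a set: repeated intersection = filter by membership in all remaining genomes
theorem a_inter_foldl (gs : List (String × (List (String × (List (String × Int)))))) (s : List Int) :
    gs.foldl (fun c g => PySem.Set.inter c
        (g.2.foldl (fun ms c => c.2.foldl (fun ms om => PySem.Set.add ms om.2) ms) PySem.Set.empty)) s
      = s.filter (fun x => gs.all (fun g => (pvSeen g.2).contains x)) := by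
  induction gs generalizing s with
  | nil => simp
  | cons g gs ih =>
    rw [List.foldl_cons, ih, a_mset_eq]
    simp only [PySem.Set.inter, List.filter_filter, List.all_cons]
    exact List.filter_congr (fun x _ => Bool.and_comm _ _)

-- the option-state fold of A, once the head genome has seeded the core
theorem a_some_foldl (gs : List (String × (List (String × (List (String × Int)))))) (s : List Int) :
    gs.foldl
      (fun core g =>
        let marker_set : PySem.Set Int :=
          g.2.foldl (fun ms c => c.2.foldl (fun ms om => PySem.Set.add ms om.2) ms) PySem.Set.empty
        match core with
        | none => some marker_set
        | some c => some (PySem.Set.inter c marker_set))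
      (some s)
    = some (gs.foldl (fun c g => PySem.Set.inter c
        (g.2.foldl (fun ms c => c.2.foldl (fun ms om => PySem.Set.add ms om.2) ms) PySem.Set.empty)) s) := by
  induction gs generalizing s with
  | nil => rfl
  | cons g gs ih => simp only [List.foldl_cons]; exact ih _

-- A on a nonempty genome list: the head seeds the core (definitional step), then the fold above
theorem a_cons_eq (g : String × (List (String × (List (String × Int)))))
    (gs : List (String × (List (String × (List (String × Int)))))) :
    get_core (g :: gs)
      = some (List.filter (fun x => gs.all (fun g' => (pvSeen g'.2).contains x)) (pvSeen g.2)) := by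
  have h : get_core (g :: gs)
      = gs.foldl
          (fun core g =>
            let marker_set : PySem.Set Int :=
              g.2.foldl (fun ms c => c.2.foldl (fun ms om => PySem.Set.add ms om.2) ms) PySem.Set.empty
            match core with
            | none => some marker_set
            | some c => some (PySem.Set.inter c marker_set))
          (some (g.2.foldl (fun ms c => c.2.foldl (fun ms om => PySem.Set.add ms om.2) ms) PySem.Set.empty)) := rfl
  have h2 := a_some_foldl gs (pvSeen g.2)
  rw [a_inter_foldl] at h2
  rw [h, a_mset_eq]
  exact h2

-- B's nested counting loop is Counter of the concatenation of the per-genome sets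
theorem b_counter_eq (gnms : List (String × (List (String × (List (String × Int)))))) :
    gnms.foldl (fun d g => (pvSeen g.2).foldl (fun d m => d.insert m (d.getD m 0 + 1)) d) PySem.Dict.empty
      = PySem.Dict.counter (gnms.flatMap (fun g => pvSeen g.2)) := by
  rw [← PySem.Dict.foldl_insert_getD_add_one_eq_counter, List.flatMap_def, List.foldl_flatten,
    List.foldl_map]

theorem count_flatMap_le (gs : List (String × (List (String × (List (String × Int)))))) (x : Int) :
    (gs.flatMap (fun g => pvSeen g.2)).count x ≤ gs.length := by
  induction gs with
  | nil => simp
  | cons g gs ih =>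
    have h1 : (pvSeen g.2).count x ≤ 1 :=
      List.nodup_iff_count_le_one.mp (PySem.Set.nodup_ofList _) x
    simp only [List.flatMap_cons, List.count_append, List.length_cons]
    omega

theorem count_flatMap_eq_iff (gs : List (String × (List (String × (List (String × Int)))))) (x : Int) :
    (gs.flatMap (fun g => pvSeen g.2)).count x = gs.length ↔ ∀ g ∈ gs, x ∈ pvSeen g.2 := by
  induction gs with
  | nil => simp
  | cons g gs ih =>
    have h1 : (pvSeen g.2).count x ≤ 1 :=
      List.nodup_iff_count_le_one.mp (PySem.Set.nodup_ofList _) x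
    have h2 := count_flatMap_le gs x
    simp only [List.flatMap_cons, List.count_append, List.length_cons, List.mem_cons]
    constructor
    · intro h
      have hx : (pvSeen g.2).count x = 1 := by omega
      have hrest : (gs.flatMap (fun g => pvSeen g.2)).count x = gs.length := by omega
      exact fun g' hg' => hg'.elim (fun he => he ▸ List.count_pos_iff.mp (by omega)) (ih.mp hrest g')
    · intro h
      have hx : (pvSeen g.2).count x = 1 := by
        have := List.count_pos_iff.mpr (h g (Or.inl rfl)); omega
      have := ih.mpr (fun g' hg' => h g' (Or.inr hg'))
      omega

-- the thresholded counter yields exactly the head genome's markers present in every genome, in order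
theorem b_filter_eq (g : String × (List (String × (List (String × Int)))))
    (gs : List (String × (List (String × (List (String × Int)))))) :
    PySem.Set.ofList
        ((((PySem.Dict.counter ((g :: gs).flatMap (fun g => pvSeen g.2))).items.filter
            (fun p => p.2 == (((g :: gs).length : Nat) : Int))).map (fun p => p.1)))
      = List.filter (fun x => gs.all (fun g' => (pvSeen g'.2).contains x)) (pvSeen g.2) := by
  have hL : ∀ x : Int, ((g :: gs).flatMap (fun g => pvSeen g.2)).count x
      = (pvSeen g.2).count x + (gs.flatMap (fun g => pvSeen g.2)).count x := by
    intro x; rw [List.flatMap_cons, List.count_append]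
  rw [PySem.Dict.items_counter, List.filter_map, List.map_map]
  have hfil : ((fun p : Int × Int => p.1) ∘ fun k : Int => (k, ((((g :: gs).flatMap (fun g => pvSeen g.2)).count k : Nat) : Int)))
      = id := rfl
  rw [hfil, List.map_id]
  have hpred : ((fun p : Int × Int => p.2 == (((g :: gs).length : Nat) : Int)) ∘ fun k : Int => (k, ((((g :: gs).flatMap (fun g => pvSeen g.2)).count k : Nat) : Int)))
      = fun k : Int => ((((g :: gs).flatMap (fun g => pvSeen g.2)).count k : Int) == ((g :: gs).length : Int)) := rfl
  rw [hpred]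
  rw [PySem.Set.ofList_eq_self_of_nodup _ ((PySem.Set.nodup_ofList _).filter _)]
  have hsplit : PySem.Set.ofList ((g :: gs).flatMap (fun g => pvSeen g.2))
      = pvSeen g.2 ++ List.filter (fun y => !(pvSeen g.2).contains y)
          (PySem.Set.ofList (gs.flatMap (fun g => pvSeen g.2))) := by
    have hnd : (pvSeen g.2).Nodup := PySem.Set.nodup_ofList _
    rw [List.flatMap_cons, PySem.Set.ofList_append,
      PySem.Set.ofList_eq_self_of_nodup (pvSeen g.2) hnd,
      PySem.Set.update_eq_append_filter]
  rw [hsplit, List.filter_append]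
  have hextra : List.filter (fun k : Int => ((((g :: gs).flatMap (fun g => pvSeen g.2)).count k : Int) == ((g :: gs).length : Int)))
      (List.filter (fun y => !(pvSeen g.2).contains y)
        (PySem.Set.ofList (gs.flatMap (fun g => pvSeen g.2)))) = [] := by
    rw [List.filter_eq_nil_iff]
    intro y hy
    have hyn : y ∉ pvSeen g.2 := by
      have := (List.mem_filter.mp hy).2
      simpa [PySem.Set.contains_iff] using this
    have h0 : (pvSeen g.2).count y = 0 := List.count_eq_zero.mpr hyn
    have hle := count_flatMap_le gs y
    simp only [beq_iff_eq, Nat.cast_inj]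
    intro hc
    have : ((g :: gs).flatMap (fun g => pvSeen g.2)).count y = (g :: gs).length := by exact_mod_cast hc
    rw [hL y, List.length_cons] at this
    omega
  rw [hextra, List.append_nil]
  apply List.filter_congr
  intro x hx
  have hnd : (pvSeen g.2).Nodup := PySem.Set.nodup_ofList _
  have h1 : (pvSeen g.2).count x = 1 := by
    have hle := List.nodup_iff_count_le_one.mp hnd x
    have := List.count_pos_iff.mpr hx
    omega
  have hiff : ((g :: gs).flatMap (fun g => pvSeen g.2)).count x = (g :: gs).length
      ↔ ∀ g' ∈ gs, x ∈ pvSeen g'.2 := by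
    rw [hL, h1, List.length_cons]
    constructor
    · intro h; exact (count_flatMap_eq_iff gs x).mp (by omega)
    · intro h; have := (count_flatMap_eq_iff gs x).mpr h; omega
  rw [Bool.eq_iff_iff]
  simp only [beq_iff_eq, List.all_eq_true, PySem.Set.contains_iff]
  constructor
  · intro hc; exact hiff.mp (by exact_mod_cast hc)
  · intro h; exact_mod_cast hiff.mpr h

-- ===== VERDICT (by name: the statement is the Claim_ definition above) =====
theorem get_core_spec : Claim_equal_get_core := by
  intro gnms _
  unfold Spec_get_core
  cases gnms with
  | nil => rfl
  | cons g gs =>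
    have hB : get_core_alt (g :: gs)
        = some (PySem.Set.ofList
            (((((g :: gs).foldl
                  (fun d g => (pvSeen g.2).foldl (fun d m => d.insert m (d.getD m 0 + 1)) d)
                  PySem.Dict.empty).items.filter
                (fun p => p.2 == (((g :: gs).length : Nat) : Int))).map (fun p => p.1)))) := rfl
    rw [a_cons_eq, hB, b_counter_eq, b_filter_eq]
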